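-- pv_equiv track=rewrite | github.com/BPI-SINOVOIP/BPI-A64-Android7 | android/external/adt-infra/build/scripts/slave/recipe_modules/auto_bisect/bisect_results.py | _pretty_table
-- ===== SOURCE A (Python) =====
-- def _pretty_table(data):
--   """Arrange a matrix of strings into an ascii table.
--
--   This function was ripped off directly from somewhere in skia. It is
--   inefficient and so, should be avoided for large data sets.
--
--   Args:
--     data (list): A list of lists of strings containing the data to tabulate. It
--       is expected to be rectangular.
--
--   Returns: A multi-line string containing the data arranged in a tabular manner.
--   """
--   result = ''
--   column_widths = [0] * len(data[0])
--   for row in data: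
--     column_widths = [max(longest_len, len(prop)) for
--                      longest_len, prop in zip(column_widths, row)]
--   for row in data:
--     is_culprit_row = row[-1] == '<-'
--     if is_culprit_row:
--       result += '\n'
--     for prop, width in zip(row, column_widths):
--       result += prop.ljust(width + 1)
--     result += '\n'
--     if is_culprit_row:
--       result += '\n'
--   return result
-- ===== SOURCE B (Python) =====
-- def _pretty_table(data):
--   """Pad each column independently (column-major), then reassemble rows by
--   indexing into the padded columns."""
--   ncols = min(map(len, data))
--   padded_cols = []
--   for j in range(ncols):
--     col = [row[j] for row in data]
--     width = max(map(len, col)) + 1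
--     padded_cols.append([cell.ljust(width) for cell in col])
--   lines = []
--   for i, row in enumerate(data):
--     line = ''.join(col[i] for col in padded_cols)
--     if row[-1] == '<-':
--       line = '\n%s\n' % line
--     lines.append(line + '\n')
--   return ''.join(lines)
-- ===== Notes on version B (the rewrite author's own statement) =====
-- stated objective: alternative
-- what changed: B never keeps a running width list: it pads each column independently into a list of padded columns (column-major pass), then reassembles each output line by indexing the i-th cell out of every padded column, instead of A's row-major fold of widths followed by inline ljust per row.
-- outside the precondition, e.g. on _pretty_table([]): A raises IndexError, B raises ValueError; on _pretty_table([['a'], []]): A raises IndexError, B raises IndexError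
import Mathlib
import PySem

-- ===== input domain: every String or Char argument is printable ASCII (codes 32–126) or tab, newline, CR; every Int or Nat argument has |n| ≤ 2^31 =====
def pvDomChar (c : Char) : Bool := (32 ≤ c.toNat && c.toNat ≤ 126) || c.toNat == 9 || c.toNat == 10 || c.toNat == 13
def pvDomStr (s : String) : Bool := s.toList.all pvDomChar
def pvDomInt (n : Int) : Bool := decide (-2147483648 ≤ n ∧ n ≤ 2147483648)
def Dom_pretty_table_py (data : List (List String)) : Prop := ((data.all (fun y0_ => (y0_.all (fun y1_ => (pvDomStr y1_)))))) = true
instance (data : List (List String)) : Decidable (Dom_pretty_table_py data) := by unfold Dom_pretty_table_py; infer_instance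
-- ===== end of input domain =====

-- B pads each column independently into padded columns and reassembles each line by
-- indexing the padded columns, instead of A's row-major width fold with inline ljust
-- (objective: alternative, same asymptotic cost).

-- exact model of Python's s.ljust(w) for a nonnegative width w (both Pythons call it)
def pyLjust (cs : List Char) (w : Nat) : List Char := cs ++ List.replicate (w - cs.length) ' '

-- ===== PORT A =====
def pretty_table_py (data : List (List String)) : String :=
  -- column_widths = [0] * len(data[0])  (data[0]: Pre_ gives data ≠ [])
  let column_widths0 : List Nat := List.replicate (data.headD []).length 0
  -- for row in data: column_widths = [max(l, len(p)) for l, p in zip(column_widths, row)]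
  let column_widths := data.foldl
    (fun ws row => (ws.zip row).map (fun lp => max lp.1 lp.2.toList.length)) column_widths0
  -- second loop, accumulating result
  let result := data.foldl (fun res row =>
    let is_culprit := PySem.List.pyGetD row (-1) "" == "<-"   -- row[-1]: Pre_ gives row ≠ []
    let res := if is_culprit then res ++ ['\n'] else res
    let res := (row.zip column_widths).foldl
      (fun r pw => r ++ pyLjust pw.1.toList (pw.2 + 1)) res
    let res := res ++ ['\n']
    if is_culprit then res ++ ['\n'] else res) []
  String.ofList result

-- ===== PORT B =====
-- ncols = min(map(len, data))  (min() raises ValueError on []: Pre_ gives data ≠ [],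
-- so the 0 returned on [] is never relied upon)
def colMin (data : List (List String)) : Nat :=
  match data with
  | [] => 0
  | r :: rs => rs.foldl (fun m row => min m row.length) r.length

-- the padded-columns loop of Source B: for j in range(ncols), pad column j to its own width (+1)
def padCols (data : List (List String)) : List (List (List Char)) :=
  (List.range (colMin data)).map (fun j =>
    let col := data.map (fun row => row.getD j "")   -- row[j]: j < every row's length
    let width := col.foldl (fun m cell => max m cell.toList.length) 0 + 1
    col.map (fun cell => pyLjust cell.toList width))

-- one line of Source B: ''.join(col[i] for col in padded_cols), culprit wrapping, + '\n'
def bLine (padded : List (List (List Char))) (ri : List String × Nat) : List Char :=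
  let line := PySem.Chars.join [] (padded.map (fun col => col.getD ri.2 []))
  let line := if PySem.List.pyGetD ri.1 (-1) "" == "<-"
              then ['\n'] ++ line ++ ['\n'] else line
  line ++ ['\n']

def pretty_table_py_alt (data : List (List String)) : String :=
  let padded_cols := padCols data
  -- for i, row in enumerate(data): emit the row's line; join the lines
  String.ofList (PySem.Chars.join [] (data.zipIdx.map (bLine padded_cols)))

-- ===== PRECONDITION & SPEC =====
-- A raises IndexError on data = [] (data[0]) and on any empty row (row[-1]); Pre_ excludes exactly those.
def Pre_pretty_table_py (data : List (List String)) : Prop :=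
  data ≠ [] ∧ ∀ row ∈ data, row ≠ []
instance (data : List (List String)) : Decidable (Pre_pretty_table_py data) := by
  unfold Pre_pretty_table_py; infer_instance
def pvWitness_pretty_table_py : List (List String) := [["a", "bb"], ["ccc", "<-"]]

def Spec_pretty_table_py (data : List (List String)) (out : String) : Prop :=
  out = pretty_table_py_alt data
instance (data : List (List String)) (out : String) : Decidable (Spec_pretty_table_py data out) := by
  unfold Spec_pretty_table_py; infer_instance

-- ===== CLAIM (what is proved, stated in full; the proofs are below) =====
def Claim_equal_pretty_table_py : Prop := ∀ (data : List (List String)), Dom_pretty_table_py data → Pre_pretty_table_py data → Spec_pretty_table_py data (pretty_table_py data)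

-- ===== LEMMAS AND PROOFS =====

-- the common width of column j (proof-side abbreviation)
def colW (data : List (List String)) (j : Nat) : Nat :=
  (data.map (fun row => row.getD j "")).foldl (fun m cell => max m cell.toList.length) 0

-- the widths list both programs effectively use
def cw (data : List (List String)) : List Nat :=
  (List.range (colMin data)).map (colW data)

theorem fold_min_le (rows : List (List String)) (n : Nat) :
    rows.foldl (fun m row => min m row.length) n ≤ n := by
  induction rows generalizing n with
  | nil => simp
  | cons r rs ih => exact le_trans (ih _) (Nat.min_le_left _ _)

theorem fold_min_le_mem (rows : List (List String)) :
    ∀ (n : Nat) (row : List String), row ∈ rows →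
    rows.foldl (fun m r => min m r.length) n ≤ row.length := by
  induction rows with
  | nil => intro n row h; cases h
  | cons s ss ih =>
    intro n row h
    rcases List.mem_cons.mp h with h' | h'
    · subst h'; exact le_trans (fold_min_le ss _) (Nat.min_le_right _ _)
    · exact ih _ _ h'

theorem colMin_le (data : List (List String)) (row : List String) (h : row ∈ data) :
    colMin data ≤ row.length := by
  cases data with
  | nil => cases h
  | cons r rs =>
    rcases List.mem_cons.mp h with h' | h'
    · subst h'; exact fold_min_le rs _
    · exact fold_min_le_mem rs _ _ h'

theorem fold_len (rows : List (List String)) (ws : List Nat) :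
    (rows.foldl (fun ws row => (ws.zip row).map (fun lp => max lp.1 lp.2.toList.length)) ws).length
    = rows.foldl (fun n row => min n row.length) ws.length := by
  induction rows generalizing ws with
  | nil => rfl
  | cons r rs ih => rw [List.foldl_cons, ih]; simp

theorem step_getD (ws : List Nat) (r : List String) (j : Nat)
    (h1 : j < ws.length) (h2 : j < r.length) :
    ((ws.zip r).map (fun lp => max lp.1 lp.2.toList.length)).getD j 0
    = max (ws.getD j 0) ((r.getD j "").toList.length) := by
  simp [List.getD_eq_getElem?_getD, h1, h2, Nat.lt_min.mpr ⟨h1, h2⟩]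

theorem fold_getD (rows : List (List String)) (ws : List Nat) (j : Nat)
    (h : j < (rows.foldl (fun ws row => (ws.zip row).map (fun lp => max lp.1 lp.2.toList.length)) ws).length) :
    (rows.foldl (fun ws row => (ws.zip row).map (fun lp => max lp.1 lp.2.toList.length)) ws).getD j 0
    = rows.foldl (fun a row => max a (row.getD j "").toList.length) (ws.getD j 0) := by
  induction rows generalizing ws with
  | nil => rfl
  | cons r rs ih =>
    simp only [List.foldl_cons] at h ⊢
    rw [fold_len] at h
    have hlen : j < min ws.length r.length := by
      have h2 := lt_of_lt_of_le h (fold_min_le rs _)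
      simpa using h2
    rw [ih _ (by rw [fold_len]; exact h), step_getD ws r j (lt_of_lt_of_le hlen (Nat.min_le_left _ _)) (lt_of_lt_of_le hlen (Nat.min_le_right _ _))]

theorem join_nil_eq_flatten (ls : List (List Char)) : PySem.Chars.join [] ls = ls.flatten := by
  induction ls with
  | nil => rfl
  | cons a t ih =>
    cases t with
    | nil => simp [PySem.Chars.join, List.intercalate]
    | cons b u =>
      simp only [PySem.Chars.join, List.intercalate] at *
      simp [List.intersperse] at *
      simpa using ih

-- A's row-major width fold equals the column-major widths cw
theorem widths_eq (data : List (List String)) :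
    data.foldl (fun ws row => (ws.zip row).map (fun lp => max lp.1 lp.2.toList.length))
      (List.replicate (data.headD []).length 0)
    = cw data := by
  cases data with
  | nil => rfl
  | cons r0 rs =>
    apply List.ext_getElem
    · rw [fold_len]
      simp [cw, colMin]
    · intro j hj hj'
      have hjm : j < colMin (r0 :: rs) := by simpa [cw] using hj'
      rw [← List.getD_eq_getElem _ 0, ← List.getD_eq_getElem _ 0]
      rw [fold_getD _ _ _ hj]
      have hrep : (List.replicate ((r0 :: rs).headD []).length (0:Nat)).getD j 0 = 0 := by
        simp [List.getD_eq_getElem?_getD]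
      rw [hrep]
      simp [cw, colW, List.getD_eq_getElem?_getD, List.getElem?_range hjm,
        List.foldl_map]

-- the per-row chunk both programs emit (with the agreed widths ws)
def rowChunk (ws : List Nat) (row : List String) : List Char :=
  (let line := PySem.Chars.join []
      ((row.zip ws).map (fun pw => pyLjust pw.1.toList (pw.2 + 1)))
   let line := if PySem.List.pyGetD row (-1) "" == "<-"
               then ['\n'] ++ line ++ ['\n'] else line
   line ++ ['\n'])

theorem outer_fold (data : List (List String)) (ws : List Nat) (acc : List Char) :
    data.foldl (fun res row =>
      let is_culprit := PySem.List.pyGetD row (-1) "" == "<-"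
      let res := if is_culprit then res ++ ['\n'] else res
      let res := (row.zip ws).foldl (fun r pw => r ++ pyLjust pw.1.toList (pw.2 + 1)) res
      let res := res ++ ['\n']
      if is_culprit then res ++ ['\n'] else res) acc
    = acc ++ (data.map (rowChunk ws)).flatten := by
  induction data generalizing acc with
  | nil => simp
  | cons row rest ih =>
    rw [List.foldl_cons, ih]
    simp only [List.map_cons, List.flatten_cons, ← List.append_assoc]
    congr 1
    simp only [rowChunk, join_nil_eq_flatten, ← List.flatMap_def,
      PySem.List.foldl_append_eq_flatMap]
    by_cases hc : PySem.List.pyGetD row (-1) "" == "<-" <;> simp [hc]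

-- the i-th cell of every padded column, in order, is A's padded-cell list for row i
theorem cols_line_eq (data : List (List String)) (i : Nat) (hi : i < data.length)
    (hrow : colMin data ≤ data[i].length) :
    (padCols data).map (fun col => col.getD i [])
    = (data[i].zip (cw data)).map (fun pw => pyLjust pw.1.toList (pw.2 + 1)) := by
  apply List.ext_getElem
  · simp [padCols, cw]; omega
  · intro j hj hj'
    have hjm : j < colMin data := by simpa [padCols] using hj
    simp only [padCols, List.getElem_map, List.getElem_range, List.getElem_zip]
    have hcw : (cw data)[j]'(by simpa [cw] using hjm) = colW data j := by
      simp [cw]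
    rw [hcw]
    have : ((data.map (fun row => row.getD j "")).map
        (fun cell => pyLjust cell.toList (colW data j + 1))).getD i []
        = pyLjust (data[i].getD j "").toList (colW data j + 1) := by
      rw [List.getD_eq_getElem _ [] (by simpa using hi)]
      simp [colW]
    simp only [colW] at this
    rw [this]
    congr 1
    rw [List.getD_eq_getElem _ "" (lt_of_lt_of_le hjm hrow)]

theorem bLine_eq (data : List (List String)) (i : Nat) (hi : i < data.length)
    (hrow : colMin data ≤ data[i].length) :
    bLine (padCols data) (data[i], i) = rowChunk (cw data) data[i] := by
  simp only [bLine, rowChunk]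
  rw [cols_line_eq data i hi hrow]

theorem pretty_table_py_spec : Claim_equal_pretty_table_py := by
  intro data _ hpre
  unfold Spec_pretty_table_py
  simp only [pretty_table_py, pretty_table_py_alt]
  rw [widths_eq, outer_fold, join_nil_eq_flatten]
  have hmap : data.zipIdx.map (bLine (padCols data)) = data.map (rowChunk (cw data)) := by
    apply List.ext_getElem
    · simp
    · intro i hi hi'
      simp only [List.getElem_map, List.getElem_zipIdx, Nat.zero_add]
      exact bLine_eq data i (by simpa using hi')
        (colMin_le data _ (List.getElem_mem _))
  rw [hmap]
  simp
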